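-- pv_equiv track=rewrite | github.com/craigbarns/confidoc | app/services/text_segment_selector.py | _iter_windows
-- ===== SOURCE A (Python) =====
-- _WINDOW_CHARS: int = 5_500
--
-- _STEP_CHARS: int = 1_400
--
-- def _iter_windows(full: str) -> list[tuple[int, int, str]]:
--     n = len(full)
--     if n <= _WINDOW_CHARS:
--         return [(0, n, full)]
--     out: list[tuple[int, int, str]] = []
--     start = 0
--     while start < n:
--         end = min(n, start + _WINDOW_CHARS)
--         out.append((start, end, full[start:end]))
--         if end >= n:
--             break
--         start += _STEP_CHARS
--     return out
-- ===== SOURCE B (Python) =====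
-- _WINDOW_CHARS: int = 5_500
--
-- _STEP_CHARS: int = 1_400
--
-- def _iter_windows(full: str) -> list[tuple[int, int, str]]:
--     # Recursively peel the first window off the remaining text, tracking the
--     # absolute offset; the base case covers the final (possibly short) window.
--     return _windows_from(full, 0)
--
-- def _windows_from(rest: str, off: int) -> list[tuple[int, int, str]]:
--     if len(rest) <= _WINDOW_CHARS:
--         return [(off, off + len(rest), rest)]
--     return [(off, off + _WINDOW_CHARS, rest[:_WINDOW_CHARS])] + \
--         _windows_from(rest[_STEP_CHARS:], off + _STEP_CHARS)
-- ===== Notes on version B (the rewrite author's own statement) =====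
-- stated objective: alternative
-- what changed: Replaced the cursor-and-break while loop over indices into the full string with a recursion that peels the first window off the remaining suffix, carrying the shrinking rest string and an absolute offset; the final short window is the recursion's base case.
import Mathlib
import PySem

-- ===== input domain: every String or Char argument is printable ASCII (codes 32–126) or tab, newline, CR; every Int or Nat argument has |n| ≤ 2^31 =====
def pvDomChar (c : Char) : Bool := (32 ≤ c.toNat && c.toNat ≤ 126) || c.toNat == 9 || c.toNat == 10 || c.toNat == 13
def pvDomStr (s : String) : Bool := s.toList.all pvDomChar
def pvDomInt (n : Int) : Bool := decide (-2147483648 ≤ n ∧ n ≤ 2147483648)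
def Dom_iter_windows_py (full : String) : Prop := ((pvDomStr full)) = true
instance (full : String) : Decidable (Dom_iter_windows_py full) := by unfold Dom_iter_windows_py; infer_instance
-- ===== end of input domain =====

-- B replaces A's index-cursor while loop with a recursion that peels the first window off
-- the remaining suffix string, carrying an absolute offset (alternative decomposition).

-- ===== PORT A =====
-- the while loop: start cursor, append a window, break when the window reaches the end
def iterA_loop (full : String) (n : Int) (start : Int)
    (out : List (Int × Int × String)) : List (Int × Int × String) :=
  if _h : start < n then
    let e := min n (start + 5500)
    let out' := out ++ [(start, e, PySem.Str.slice full (some start) (some e))]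
    if e ≥ n then out'
    else iterA_loop full n (start + 1400) out'
  else out
termination_by (n - start).toNat
decreasing_by omega

def iter_windows_py (full : String) : List (Int × Int × String) :=
  let n := PySem.Str.len full
  if n ≤ 5500 then [(0, n, full)]
  else iterA_loop full n 0 []

-- ===== PORT B =====
-- _windows_from: peel the first window off `rest`, recurse on rest[1400:]
def windowsFrom (rest : String) (off : Int) : List (Int × Int × String) :=
  if _h : PySem.Str.len rest ≤ 5500 then [(off, off + PySem.Str.len rest, rest)]
  else [(off, off + 5500, PySem.Str.slice rest none (some 5500))]
        ++ windowsFrom (PySem.Str.slice rest (some 1400) none) (off + 1400)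
termination_by rest.toList.length
decreasing_by
  simp only [PySem.Str.slice, PySem.Chars.slice, String.toList_ofList,
    PySem.List.slice_from (rest.toList) (a := (1400 : Int)) (by norm_num),
    List.length_drop, PySem.Str.len_eq] at *
  omega

def iter_windows_py_alt (full : String) : List (Int × Int × String) :=
  windowsFrom full 0

-- ===== PRECONDITION & SPEC =====
def Spec_iter_windows_py (full : String) (out : List (Int × Int × String)) : Prop := out = iter_windows_py_alt full
instance (full : String) (out : List (Int × Int × String)) : Decidable (Spec_iter_windows_py full out) := by unfold Spec_iter_windows_py; infer_instance

-- ===== CLAIM (what is proved, stated in full; the proofs are below) =====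
def Claim_equal_iter_windows_py : Prop := ∀ (full : String), Dom_iter_windows_py full → Spec_iter_windows_py full (iter_windows_py full)

-- ===== LEMMAS AND PROOFS =====

-- one unfolding of A's loop when the guard start < n holds
theorem iterA_loop_step (full : String) (n start : Int) (out : List (Int × Int × String)) (h : start < n) :
    iterA_loop full n start out =
      if min n (start + 5500) ≥ n
      then out ++ [(start, min n (start + 5500), PySem.Str.slice full (some start) (some (min n (start + 5500))))]
      else iterA_loop full n (start + 1400)
        (out ++ [(start, min n (start + 5500), PySem.Str.slice full (some start) (some (min n (start + 5500))))]) := by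
  rw [iterA_loop, dif_pos h]

theorem iterA_loop_eq_windowsFrom (full : String) :
    ∀ (m : Nat) (off : Nat), full.toList.length - off = m → off < full.toList.length →
      ∀ out, iterA_loop full (full.toList.length : Int) (off : Int) out
        = out ++ windowsFrom (String.ofList (full.toList.drop off)) (off : Int) := by
  intro m
  induction m using Nat.strong_induction_on with
  | _ m ih =>
  intro off hm hofflt out
  rw [iterA_loop_step full _ _ out (by exact_mod_cast hofflt)]
  rw [windowsFrom]
  by_cases hbig : off + 5500 < full.toList.length
  · -- loop continues
    have hmin : min (full.toList.length : Int) ((off : Int) + 5500) = (off : Int) + 5500 := by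
      omega
    have hbig' : ((off : Int)) + 5500 < (full.toList.length : Int) := by exact_mod_cast hbig
    simp only [hmin, ge_iff_le]
    rw [if_neg (show ¬ ((full.toList.length : Int) ≤ (off : Int) + 5500) by omega)]
    rw [dif_neg (by
      simp only [PySem.Str.len_eq, String.toList_ofList, List.length_drop]
      omega)]
    have hrec := ih (full.toList.length - (off + 1400)) (by omega) (off + 1400) rfl (by omega)
      (out ++ [((off : Int), (off : Int) + 5500, PySem.Str.slice full (some (off : Int)) (some ((off : Int) + 5500)))])
    have hcast : ((off : Int) + 1400) = (((off + 1400 : Nat)) : Int) := by push_cast; ring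
    rw [hcast, hrec]
    have hs1 : PySem.Str.slice full (some (off : Int)) (some ((off : Int) + 5500))
        = PySem.Str.slice (String.ofList (full.toList.drop off)) none (some 5500) := by
      simp only [PySem.Str.slice, PySem.Chars.slice, String.toList_ofList]
      have h1 : ((off : Int) + 5500) = (((off + 5500 : Nat)) : Int) := by push_cast; ring
      rw [h1, PySem.List.slice_natCast, PySem.List.slice_to _ (by norm_num)]
      have h2 : off + 5500 - off = 5500 := by omega
      rw [h2, show Int.toNat 5500 = 5500 from by omega]
    have hs2 : PySem.Str.slice (String.ofList (full.toList.drop off)) (some 1400) none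
        = String.ofList (full.toList.drop (off + 1400)) := by
      simp only [PySem.Str.slice, PySem.Chars.slice, String.toList_ofList]
      rw [PySem.List.slice_from _ (by norm_num), List.drop_drop]
      congr 2
    rw [hs1, hs2, List.append_assoc, List.singleton_append]
  · -- last window
    have hmin : min (full.toList.length : Int) ((off : Int) + 5500) = (full.toList.length : Int) := by
      omega
    simp only [hmin, ge_iff_le, le_refl, if_pos]
    rw [dif_pos (by
      simp only [PySem.Str.len_eq, String.toList_ofList, List.length_drop]
      omega)]
    have hs3 : PySem.Str.slice full (some (off : Int)) (some (full.toList.length : Int))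
        = String.ofList (full.toList.drop off) := by
      simp only [PySem.Str.slice, PySem.Chars.slice]
      rw [PySem.List.slice_natCast]
      congr 1
      rw [List.take_of_length_le (by simp)]
    have hlen2 : (off : Int) + (PySem.Str.len (String.ofList (full.toList.drop off))) = (full.toList.length : Int) := by
      simp only [PySem.Str.len_eq, String.toList_ofList, List.length_drop]
      omega
    rw [hs3, hlen2]

theorem iter_windows_py_eq (full : String) :
    iter_windows_py full = iter_windows_py_alt full := by
  unfold iter_windows_py iter_windows_py_alt
  simp only [PySem.Str.len_eq]
  by_cases h : (full.toList.length : Int) ≤ 5500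
  · rw [if_pos h, windowsFrom, dif_pos (by simpa [PySem.Str.len_eq] using h)]
    simp [PySem.Str.len_eq]
  · rw [if_neg h]
    have h0 := iterA_loop_eq_windowsFrom full (full.toList.length - 0) 0 rfl (by omega) []
    simpa [String.ofList_toList] using h0

-- ===== VERDICT (by name: the statement is the Claim_ definition above) =====
theorem iter_windows_py_spec : Claim_equal_iter_windows_py := by
  intro full _
  unfold Spec_iter_windows_py
  exact iter_windows_py_eq full
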